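-- pv_equiv track=rewrite | github.com/PrefLib/preflibtools | preflibtools/properties/subdomains/ordinal/singlepeaked/k_axes.py | is_alpha
-- ===== SOURCE A (Python) =====
-- from itertools import combinations, product
--
-- def is_alpha(v0: list[int], v1: list[int]):
--     """
--     A helper function for the 2-axes single-peaked function.
--     Tests whether two votes contain an alpha-structure.
--
--     :param v0: first vote.
--     :type v0: list[int]
--     :param v1: second vote.
--     :type v1: list[int]
--
--     :return: whether the two votes contain an alpha-structure
--     :rtype: bool
--     """
--     if len(v0) < 4:
--         return False
--
--     # Find b candidates
--     b_0 = v0[2:-1]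
--     b_1 = v1[2:-1]
--     b_candidates = [b for b in b_0 if b in b_1]
--
--     if len(b_candidates) == 0:
--         return False
--
--     # Find a and c candidates
--     for b in b_candidates:
--         id_b_0 = v0.index(b)
--         id_b_1 = v1.index(b)
--
--         a_0, c_0 = v0[:id_b_0], v0[id_b_0 + 1:]
--         a_1, c_1 = v1[:id_b_1], v1[id_b_1 + 1:]
--
--         a_candidates = [a for a in a_0 if a in c_1]
--         c_candidates = [c for c in c_0 if c in a_1]
--
--         # Check if d exists
--         for a_c in product(a_candidates, c_candidates):
--             d_0 = [d for d in a_0 if d in a_1 and (d not in a_c)]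
--
--             if len(d_0) != 0:
--                 return True
--
--     return False
-- ===== SOURCE B (Python) =====
-- def is_alpha(v0: list[int], v1: list[int]):
--     # Per-b candidate, replace the product-of-pairs + inner d-scan with one
--     # linear pass: an a != d exists iff A has two distinct values or its first
--     # value differs from d; likewise for c.
--     if len(v0) < 4:
--         return False
--     s1 = set(v1[2:-1])
--     for b in v0[2:-1]:
--         if b not in s1:
--             continue
--         i0 = v0.index(b)
--         i1 = v1.index(b)
--         a0, c0 = v0[:i0], v0[i0 + 1:]
--         a1s, c1s = set(v1[:i1]), set(v1[i1 + 1:])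
--         A = [a for a in a0 if a in c1s]
--         if not A:
--             continue
--         C = [c for c in c0 if c in a1s]
--         if not C:
--             continue
--         D = [d for d in a0 if d in a1s]
--         a2 = any(x != A[0] for x in A)
--         c2 = any(x != C[0] for x in C)
--         if any((a2 or A[0] != d) and (c2 or C[0] != d) for d in D):
--             return True
--     return False
-- ===== Notes on version B (the rewrite author's own statement) =====
-- stated objective: faster
-- what changed: Per b-candidate, A loops over the full product of (a,c) pairs and rebuilds a filtered d-list for each pair; B filters the a/c/d candidate lists once with set membership and decides the existence of a valid (a,c,d) triple in one linear pass using only each list's head and whether it contains two distinct values.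
import Mathlib
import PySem

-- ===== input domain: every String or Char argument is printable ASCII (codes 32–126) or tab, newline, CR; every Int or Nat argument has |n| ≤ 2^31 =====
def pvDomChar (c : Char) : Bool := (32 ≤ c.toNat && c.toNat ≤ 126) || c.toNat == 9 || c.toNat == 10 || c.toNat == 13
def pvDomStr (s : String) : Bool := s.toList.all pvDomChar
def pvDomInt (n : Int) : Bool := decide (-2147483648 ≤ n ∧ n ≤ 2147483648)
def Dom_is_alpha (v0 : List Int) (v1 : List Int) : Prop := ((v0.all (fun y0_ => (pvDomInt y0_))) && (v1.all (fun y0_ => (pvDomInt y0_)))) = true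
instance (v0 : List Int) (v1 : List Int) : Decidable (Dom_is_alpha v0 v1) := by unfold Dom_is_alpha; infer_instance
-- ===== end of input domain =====

-- B replaces A's per-b product-of-(a,c)-pairs loop with its inner d-scan by one
-- linear pass over set-filtered candidate lists (objective: faster).

-- ===== PORT A =====
-- per-b body of A's `for b in b_candidates` loop
def aPerB (v0 v1 : List Int) (b : Int) : Bool :=
  match PySem.List.index? v0 b, PySem.List.index? v1 b with
  | some i0, some i1 =>
    let a0 := PySem.List.slice v0 none (some (i0 : Int))
    let c0 := PySem.List.slice v0 (some ((i0 : Int) + 1)) none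
    let a1 := PySem.List.slice v1 none (some (i1 : Int))
    let c1 := PySem.List.slice v1 (some ((i1 : Int) + 1)) none
    let As := a0.filter (fun a => decide (a ∈ c1))
    let Cs := c0.filter (fun c => decide (c ∈ a1))
    -- `for a_c in product(...): d_0 = [...]; if len(d_0) != 0: return True`
    As.any (fun a => Cs.any (fun c =>
      decide ((a0.filter (fun d => decide (d ∈ a1) && decide (d ≠ a) && decide (d ≠ c))).length ≠ 0)))
  | _, _ => false  -- unreachable: every b candidate occurs in both votes

def is_alpha (v0 : List Int) (v1 : List Int) : Bool :=
  if v0.length < 4 then false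
  else
    let b0 := PySem.List.slice v0 (some 2) (some (-1))
    let b1 := PySem.List.slice v1 (some 2) (some (-1))
    let bc := b0.filter (fun b => decide (b ∈ b1))
    if bc.length = 0 then false
    else bc.any (aPerB v0 v1)

-- ===== PORT B =====
-- `any((a2 or A[0] != d) and (c2 or C[0] != d) for d in D)` after the two
-- nonemptiness checks, with a2 = any(x != A[0] for x in A), c2 likewise
def altBody (As Cs Ds : List Int) : Bool :=
  match As with
  | [] => false
  | A0 :: _ =>
    match Cs with
    | [] => false
    | C0 :: _ =>
      let a2 := As.any (fun x => decide (x ≠ A0))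
      let c2 := Cs.any (fun x => decide (x ≠ C0))
      Ds.any (fun d => (a2 || decide (A0 ≠ d)) && (c2 || decide (C0 ≠ d)))

-- per-b body of B's loop (after the `b not in s1: continue` guard)
def bPerB (v0 v1 : List Int) (b : Int) : Bool :=
  match PySem.List.index? v0 b, PySem.List.index? v1 b with
  | some i0, some i1 =>
    let a0 := PySem.List.slice v0 none (some (i0 : Int))
    let c0 := PySem.List.slice v0 (some ((i0 : Int) + 1)) none
    let a1s : PySem.Set Int := PySem.Set.ofList (PySem.List.slice v1 none (some (i1 : Int)))
    let c1s : PySem.Set Int := PySem.Set.ofList (PySem.List.slice v1 (some ((i1 : Int) + 1)) none)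
    altBody (a0.filter (fun a => decide (a ∈ c1s)))
            (c0.filter (fun c => decide (c ∈ a1s)))
            (a0.filter (fun d => decide (d ∈ a1s)))
  | _, _ => false  -- unreachable

def is_alpha_alt (v0 : List Int) (v1 : List Int) : Bool :=
  if v0.length < 4 then false
  else
    let s1 : PySem.Set Int := PySem.Set.ofList (PySem.List.slice v1 (some 2) (some (-1)))
    (PySem.List.slice v0 (some 2) (some (-1))).any (fun b =>
      if b ∈ s1 then bPerB v0 v1 b else false)

-- ===== PRECONDITION & SPEC =====
def Spec_is_alpha (v0 : List Int) (v1 : List Int) (out : Bool) : Prop := out = is_alpha_alt v0 v1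
instance (v0 : List Int) (v1 : List Int) (out : Bool) : Decidable (Spec_is_alpha v0 v1 out) := by unfold Spec_is_alpha; infer_instance

-- ===== CLAIM (what is proved, stated in full; the proofs are below) =====
def Claim_equal_is_alpha : Prop := ∀ (v0 : List Int) (v1 : List Int), Dom_is_alpha v0 v1 → Spec_is_alpha v0 v1 (is_alpha v0 v1)

-- ===== LEMMAS AND PROOFS =====
-- a nonempty list has an element ≠ d iff some element differs from the head or the head differs from d
lemma head_ex (A0 d : Int) (t : List Int) :
    (((A0 :: t).any (fun x => decide (x ≠ A0)) || decide (A0 ≠ d)) = true) ↔ ∃ a ∈ A0 :: t, a ≠ d := by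
  simp only [Bool.or_eq_true, List.any_eq_true, decide_eq_true_eq]
  constructor
  · rintro (⟨x, hx, hxA⟩ | hAd)
    · by_cases hxd : x = d
      · exact ⟨A0, List.mem_cons_self, fun h => hxA (hxd ▸ h.symm)⟩
      · exact ⟨x, hx, hxd⟩
    · exact ⟨A0, List.mem_cons_self, hAd⟩
  · rintro ⟨a, ha, had⟩
    by_cases hAd : A0 = d
    · exact Or.inl ⟨a, ha, by simpa [hAd] using had⟩
    · exact Or.inr hAd

lemma altBody_iff (As Cs Ds : List Int) :
    altBody As Cs Ds = true ↔ ∃ d ∈ Ds, (∃ a ∈ As, a ≠ d) ∧ (∃ c ∈ Cs, c ≠ d) := by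
  cases As with
  | nil => simp [altBody]
  | cons A0 t =>
    cases Cs with
    | nil => simp [altBody]
    | cons C0 u =>
      simp only [altBody, List.any_eq_true, Bool.and_eq_true]
      refine exists_congr fun d => ?_
      exact and_congr Iff.rfl (and_congr (head_ex A0 d t) (head_ex C0 d u))

-- the two per-b inner computations agree on the same a/c/d source lists
lemma core_eq (a0 a1 c0 c1 : List Int) :
    ((a0.filter (fun a => decide (a ∈ c1))).any (fun a =>
      (c0.filter (fun c => decide (c ∈ a1))).any (fun c =>
        decide ((a0.filter (fun d => decide (d ∈ a1) && decide (d ≠ a) && decide (d ≠ c))).length ≠ 0))))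
    = altBody (a0.filter (fun a => decide (a ∈ PySem.Set.ofList c1)))
              (c0.filter (fun c => decide (c ∈ PySem.Set.ofList a1)))
              (a0.filter (fun d => decide (d ∈ PySem.Set.ofList a1))) := by
  rw [Bool.eq_iff_iff, altBody_iff]
  simp only [List.any_eq_true, List.mem_filter, decide_eq_true_eq, Bool.and_eq_true,
    PySem.Set.mem_ofList, ne_eq, List.length_eq_zero_iff, List.filter_eq_nil_iff]
  push_neg
  constructor
  · rintro ⟨a, ⟨ha0, hac1⟩, c, ⟨hc0, hca1⟩, d, hd0, ⟨hda1, hda⟩, hdc⟩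
    exact ⟨d, ⟨hd0, hda1⟩, ⟨a, ⟨ha0, hac1⟩, fun h => hda h.symm⟩, ⟨c, ⟨hc0, hca1⟩, fun h => hdc h.symm⟩⟩
  · rintro ⟨d, ⟨hd0, hda1⟩, ⟨a, ⟨ha0, hac1⟩, had⟩, ⟨c, ⟨hc0, hca1⟩, hcd⟩⟩
    exact ⟨a, ⟨ha0, hac1⟩, c, ⟨hc0, hca1⟩, d, hd0, ⟨hda1, fun h => had h.symm⟩, fun h => hcd h.symm⟩

lemma perB_eq (v0 v1 : List Int) (b : Int) : aPerB v0 v1 b = bPerB v0 v1 b := by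
  unfold aPerB bPerB
  cases PySem.List.index? v0 b with
  | none => rfl
  | some i0 =>
    cases PySem.List.index? v1 b with
    | none => rfl
    | some i1 => exact core_eq _ _ _ _

lemma outer_eq (b0 b1 : List Int) (f g : Int → Bool) (hfg : ∀ b, f b = g b) :
    (if (b0.filter (fun b => decide (b ∈ b1))).length = 0 then false
     else (b0.filter (fun b => decide (b ∈ b1))).any f)
    = b0.any (fun b => if b ∈ PySem.Set.ofList b1 then g b else false) := by
  have hsame : (fun b => if b ∈ PySem.Set.ofList b1 then g b else false)
      = (fun b => decide (b ∈ b1) && f b) := by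
    funext b
    by_cases hb : b ∈ b1
    · simp [hb, PySem.Set.mem_ofList, hfg]
    · simp [hb, PySem.Set.mem_ofList]
  rw [hsame, ← List.any_filter]
  split_ifs with h
  · rw [List.length_eq_zero_iff.mp h]; rfl
  · rfl

theorem is_alpha_spec : Claim_equal_is_alpha := by
  intro v0 v1 _
  unfold Spec_is_alpha is_alpha is_alpha_alt
  by_cases hlen : v0.length < 4
  · simp [hlen]
  · simp only [hlen, if_false]
    exact outer_eq _ _ _ _ (perB_eq v0 v1)
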